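-- pv_equiv track=rewrite | github.com/mprpic/mdlint | src/mdlint/rules/md055.py | _split_blockquote_prefix
-- ===== SOURCE A (Python) =====
-- def _split_blockquote_prefix(line: str) -> tuple[str, str]:
--     """Split a line into its blockquote prefix and remaining content.
--
--     Returns:
--         Tuple of (prefix, content) where prefix includes blockquote
--         markers and their trailing whitespace.
--     """
--     i = 0
--     # Skip leading whitespace
--     while i < len(line) and line[i] == " ":
--         i += 1
--     # Consume blockquote markers
--     bq_start = i
--     while i < len(line) and line[i] == ">":
--         i += 1
--         # Skip space after >
--         if i < len(line) and line[i] == " ":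
--             i += 1
--     if i == bq_start:
--         return ("", line)
--     return (line[:i], line[i:])
-- ===== SOURCE B (Python) =====
-- def _split_blockquote_prefix(line: str) -> tuple[str, str]:
--     content = line.lstrip(' ')
--     if not content.startswith('>'):
--         return ('', line)
--     while content.startswith('>'):
--         content = content[1:]
--         if content.startswith(' '):
--             content = content[1:]
--     return (line[:len(line) - len(content)], content)
-- ===== Notes on version B (the rewrite author's own statement) =====
-- stated objective: idiomatic
-- what changed: Replaces A's index-arithmetic while loops over positions with idiomatic prefix stripping: lstrip removes the leading spaces, startswith-driven slicing consumes each blockquote marker plus one optional trailing space, and the prefix length falls out as the length difference.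
import Mathlib
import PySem

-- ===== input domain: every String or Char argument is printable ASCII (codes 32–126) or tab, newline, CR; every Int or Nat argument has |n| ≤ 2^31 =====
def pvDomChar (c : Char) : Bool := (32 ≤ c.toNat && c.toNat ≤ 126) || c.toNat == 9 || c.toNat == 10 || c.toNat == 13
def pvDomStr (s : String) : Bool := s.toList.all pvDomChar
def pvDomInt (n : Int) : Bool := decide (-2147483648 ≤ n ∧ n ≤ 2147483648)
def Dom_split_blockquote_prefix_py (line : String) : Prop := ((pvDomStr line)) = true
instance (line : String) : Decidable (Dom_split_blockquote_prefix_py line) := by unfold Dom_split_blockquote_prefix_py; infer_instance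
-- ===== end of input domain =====

-- B replaces A's index-arithmetic loops with idiomatic prefix stripping (lstrip/startswith): simpler, same cost.

-- ===== PORT A =====
-- while i < len(line) and line[i] == " ": i += 1   (index in range, so getD is exact)
def aSkipSpaces (s : List Char) (i : Nat) : Nat :=
  if i < s.length ∧ s.getD i ' ' = ' ' then aSkipSpaces s (i + 1) else i
termination_by s.length - i
decreasing_by omega

-- while i < len(line) and line[i] == ">": i += 1; if i < len(line) and line[i] == " ": i += 1
def aConsumeMarkers (s : List Char) (i : Nat) : Nat :=
  if i < s.length ∧ s.getD i ' ' = '>' then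
    let i1 := i + 1
    let i2 := if i1 < s.length ∧ s.getD i1 ' ' = ' ' then i1 + 1 else i1
    aConsumeMarkers s i2
  else i
termination_by s.length - i
decreasing_by split <;> omega

def split_blockquote_prefix_py (line : String) : String × String :=
  let s := line.toList
  let bq_start := aSkipSpaces s 0
  let i := aConsumeMarkers s bq_start
  if i = bq_start then ("", line)
  -- line[:i], line[i:] with 0 ≤ i ≤ len: take/drop are exact
  else (String.ofList (s.take i), String.ofList (s.drop i))

-- ===== PORT B =====
-- the while loop: content.startswith('>') → drop marker and one optional space
def bConsume : List Char → List Char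
  | '>' :: ' ' :: t => bConsume t
  | '>' :: t => bConsume t
  | r => r

def split_blockquote_prefix_py_alt (line : String) : String × String :=
  let content := line.toList.dropWhile (· == ' ')      -- line.lstrip(' '), exact for the space-stripping
  if content.head? = some '>' then                     -- content.startswith('>')
    let rest := bConsume content
    (String.ofList (line.toList.take (line.toList.length - rest.length)), String.ofList rest)
  else ("", line)

-- ===== PRECONDITION & SPEC =====
def Spec_split_blockquote_prefix_py (line : String) (out : String × String) : Prop := out = split_blockquote_prefix_py_alt line
instance (line : String) (out : String × String) : Decidable (Spec_split_blockquote_prefix_py line out) := by unfold Spec_split_blockquote_prefix_py; infer_instance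

-- ===== CLAIM (what is proved, stated in full; the proofs are below) =====
def Claim_equal_split_blockquote_prefix_py : Prop := ∀ (line : String), Dom_split_blockquote_prefix_py line → Spec_split_blockquote_prefix_py line (split_blockquote_prefix_py line)

-- ===== LEMMAS AND PROOFS =====

theorem aSkipSpaces_le (s : List Char) (i : Nat) (h : i ≤ s.length) :
    aSkipSpaces s i ≤ s.length := by
  fun_induction aSkipSpaces s i with
  | case1 i hc ih => exact ih (by omega)
  | case2 i hc => exact h

theorem aSkipSpaces_drop (s : List Char) (i : Nat) :
    s.drop (aSkipSpaces s i) = (s.drop i).dropWhile (· == ' ') := by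
  fun_induction aSkipSpaces s i with
  | case1 i hc ih =>
    obtain ⟨hlt, hsp⟩ := hc
    rw [List.drop_eq_getElem_cons hlt, List.dropWhile_cons]
    have : s[i] = ' ' := by rw [← List.getD_eq_getElem s ' ' hlt]; exact hsp
    simp [this, ih]
  | case2 i hc =>
    rcases Nat.lt_or_ge i s.length with hlt | hge
    · have : s.getD i ' ' ≠ ' ' := fun h => hc ⟨hlt, h⟩
      rw [List.drop_eq_getElem_cons hlt, List.dropWhile_cons]
      have hne : s[i] ≠ ' ' := by rw [← List.getD_eq_getElem s ' ' hlt]; exact this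
      simp [hne]
    · simp [List.drop_eq_nil_iff.mpr hge]

theorem aConsumeMarkers_ge (s : List Char) (i : Nat) : i ≤ aConsumeMarkers s i := by
  fun_induction aConsumeMarkers s i with
  | case1 i hc i1 i2 ih => have : i1 ≤ i2 := by simp only [i2]; split <;> omega
                           omega
  | case2 i hc => exact le_refl i

theorem aConsumeMarkers_le (s : List Char) (i : Nat) (h : i ≤ s.length) :
    aConsumeMarkers s i ≤ s.length := by
  fun_induction aConsumeMarkers s i with
  | case1 i hc i1 i2 ih =>
    apply ih; simp only [i2, i1]; split <;> omega
  | case2 i hc => exact h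

theorem bConsume_no_gt (l : List Char) (h : l.head? ≠ some '>') : bConsume l = l := by
  cases l with
  | nil => rfl
  | cons c t =>
    have hc : c ≠ '>' := by simpa using h
    rw [bConsume]
    · intro t1 heq; injection heq with h1 _; exact hc h1
    · intro t1 heq; injection heq with h1 _; exact hc h1

theorem aConsumeMarkers_bConsume (s : List Char) (i : Nat) (h : i ≤ s.length) :
    bConsume (s.drop i) = s.drop (aConsumeMarkers s i) := by
  fun_induction aConsumeMarkers s i with
  | case1 i hc i1 i2 ih =>
    obtain ⟨hlt, hgt⟩ := hc
    have hgt' : s[i] = '>' := by rw [← List.getD_eq_getElem s ' ' hlt]; exact hgt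
    rw [List.drop_eq_getElem_cons hlt, hgt']
    by_cases hs : i + 1 < s.length ∧ s.getD (i + 1) ' ' = ' '
    · obtain ⟨hlt1, hsp⟩ := hs
      have hsp' : s[i+1] = ' ' := by rw [← List.getD_eq_getElem s ' ' hlt1]; exact hsp
      have hi2 : i2 = i + 2 := by
        simp only [i2, i1]; split
        · rfl
        · rename_i hn; exact absurd ⟨hlt1, hsp⟩ hn
      rw [hi2] at ih
      rw [List.drop_eq_getElem_cons hlt1, hsp', bConsume, ih (by omega), hi2]
    · have hi2 : i2 = i + 1 := by
        simp only [i2, i1]; split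
        · rename_i hp; exact absurd hp hs
        · rfl
      rw [hi2] at ih
      have htail : (s.drop (i+1)).head? ≠ some ' ' := by
        rw [List.head?_drop]
        intro hh
        rcases Nat.lt_or_ge (i+1) s.length with h1 | h1
        · exact hs ⟨h1, by rw [List.getD_eq_getElem s ' ' h1]; simpa [List.getElem?_eq_getElem h1] using hh⟩
        · simp [List.getElem?_eq_none (by omega : s.length ≤ i + 1)] at hh
      have : bConsume ('>' :: s.drop (i+1)) = bConsume (s.drop (i+1)) := by
        cases hd : s.drop (i+1) with
        | nil => rfl
        | cons c t =>
          have hcne : c ≠ ' ' := by rw [hd] at htail; simpa using htail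
          rw [bConsume]
          intro t1 heq; injection heq with h1 _; exact hcne h1
      rw [this, ih (by omega), hi2]

  | case2 i hc =>
    apply bConsume_no_gt
    rw [List.head?_drop]
    intro hh
    rcases Nat.lt_or_ge i s.length with h1 | h1
    · exact hc ⟨h1, by rw [List.getD_eq_getElem s ' ' h1]; simpa [List.getElem?_eq_getElem h1] using hh⟩
    · simp [List.getElem?_eq_none h1] at hh

theorem aConsumeMarkers_gt (s : List Char) (i : Nat) (hlt : i < s.length)
    (hgt : s.getD i ' ' = '>') : i < aConsumeMarkers s i := by
  rw [aConsumeMarkers, if_pos ⟨hlt, hgt⟩]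
  refine Nat.lt_of_lt_of_le ?_ (aConsumeMarkers_ge s _)
  split <;> omega

theorem aConsumeMarkers_eq_iff (s : List Char) (i : Nat) :
    aConsumeMarkers s i = i ↔ (s.drop i).head? ≠ some '>' := by
  constructor
  · intro heq hh
    rw [List.head?_drop] at hh
    have hlt : i < s.length := by
      by_contra h
      simp [List.getElem?_eq_none (by omega : s.length ≤ i)] at hh
    have hgt : s.getD i ' ' = '>' := by
      rw [List.getD_eq_getElem s ' ' hlt]
      simpa [List.getElem?_eq_getElem hlt] using hh
    have := aConsumeMarkers_gt s i hlt hgt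
    omega
  · intro hh
    rw [aConsumeMarkers, if_neg]
    rintro ⟨hlt, hgt⟩
    apply hh
    rw [List.head?_drop, List.getElem?_eq_getElem hlt]
    rw [List.getD_eq_getElem s ' ' hlt] at hgt
    simp [hgt]

-- ===== VERDICT (by name: the statement is the Claim_ definition above) =====
theorem split_blockquote_prefix_py_spec : Claim_equal_split_blockquote_prefix_py := by
  intro line _
  unfold Spec_split_blockquote_prefix_py
  unfold split_blockquote_prefix_py split_blockquote_prefix_py_alt
  set s := line.toList with hs
  set j0 := aSkipSpaces s 0 with hj0
  set j := aConsumeMarkers s j0 with hj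
  have hj0le : j0 ≤ s.length := aSkipSpaces_le s 0 (Nat.zero_le _)
  have hdrop0 : s.drop j0 = s.dropWhile (· == ' ') := by
    rw [hj0, aSkipSpaces_drop]; simp
  by_cases hc : (s.dropWhile (· == ' ')).head? = some '>'
  · have hne : j ≠ j0 := by
      intro h
      exact ((aConsumeMarkers_eq_iff s j0).mp h) (by rw [hdrop0]; exact hc)
    rw [if_neg hne, if_pos hc]
    have hrest : bConsume (s.dropWhile (· == ' ')) = s.drop j := by
      rw [← hdrop0, aConsumeMarkers_bConsume s j0 hj0le, hj]
    have hjle : j ≤ s.length := aConsumeMarkers_le s j0 hj0le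
    rw [hrest]
    have hlen : s.length - (List.drop j s).length = j := by
      rw [List.length_drop]; omega
    simp only [hlen]
    rfl
  · have heq : j = j0 := (aConsumeMarkers_eq_iff s j0).mpr (by rw [hdrop0]; exact hc)
    rw [if_pos heq, if_neg hc]
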